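-- pv_equiv track=rewrite | github.com/thealper2/codewars-solutions | 7-kyu/pair_zeros.py | pair_zeros
-- ===== SOURCE A (Python) =====
-- def pair_zeros(arr):
--     zero_count = 0
--     result = []
--     for num in arr:
--         if num == 0:
--             zero_count += 1
--             if zero_count % 2 == 0:
--                 continue
--
--         result.append(num)
--     return result
-- ===== SOURCE B (Python) =====
-- def pair_zeros(arr):
--     zero_positions = [i for i, x in enumerate(arr) if x == 0]
--     drop = {p for k, p in enumerate(zero_positions) if k % 2 == 1}
--     return [x for i, x in enumerate(arr) if i not in drop]
-- ===== Notes on version B (the rewrite author's own statement) =====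
-- stated objective: alternative
-- what changed: Replaces A's single stateful counter loop by an index-based two-pass scheme: first collect the positions of all zeros, build the set of every second zero position, then filter the array by index membership.
import Mathlib
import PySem

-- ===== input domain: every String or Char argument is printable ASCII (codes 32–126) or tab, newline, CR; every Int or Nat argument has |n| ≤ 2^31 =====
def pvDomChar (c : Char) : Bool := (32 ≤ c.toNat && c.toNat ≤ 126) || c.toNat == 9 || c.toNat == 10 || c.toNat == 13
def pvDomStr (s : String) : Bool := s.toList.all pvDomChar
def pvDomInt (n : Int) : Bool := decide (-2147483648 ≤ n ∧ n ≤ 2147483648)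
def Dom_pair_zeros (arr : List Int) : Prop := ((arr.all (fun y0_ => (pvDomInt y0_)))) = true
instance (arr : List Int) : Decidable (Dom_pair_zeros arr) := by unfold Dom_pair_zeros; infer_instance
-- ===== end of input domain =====

-- B replaces A's stateful counter loop by a two-pass index scheme (collect zero positions,
-- drop every second one, filter by index); alternative decomposition, same cost.


-- ===== PORT A =====
-- literal transliteration of A's loop body (state = (zero_count, result))
def pairZerosStep (st : Int × List Int) (num : Int) : Int × List Int :=
  if num == 0 then
    let zc := st.1 + 1
    if PySem.Int.mod zc 2 == 0 then (zc, st.2)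
    else (zc, st.2 ++ [num])
  else (st.1, st.2 ++ [num])

def pair_zeros (arr : List Int) : List Int :=
  (arr.foldl pairZerosStep ((0 : Int), ([] : List Int))).2

-- ===== PORT B =====
-- literal transliteration of B: zero positions, drop-set of every second one, index filter
def pair_zeros_alt (arr : List Int) : List Int :=
  let zero_positions :=
    ((PySem.List.enumerate arr).filter (fun p => p.2 == 0)).map (fun p => p.1)
  let drop : PySem.Set Int :=
    PySem.Set.ofList
      (((PySem.List.enumerate zero_positions).filter
          (fun q => PySem.Int.mod q.1 2 == 1)).map (fun q => q.2))
  ((PySem.List.enumerate arr).filter (fun p => !(PySem.Set.contains drop p.1))).map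
    (fun p => p.2)

-- ===== PRECONDITION & SPEC =====
def Spec_pair_zeros (arr : List Int) (out : List Int) : Prop := out = pair_zeros_alt arr
instance (arr : List Int) (out : List Int) : Decidable (Spec_pair_zeros arr out) := by unfold Spec_pair_zeros; infer_instance

-- ===== CLAIM (what is proved, stated in full; the proofs are below) =====
def Claim_equal_pair_zeros : Prop := ∀ (arr : List Int), Dom_pair_zeros arr → Spec_pair_zeros arr (pair_zeros arr)

-- ===== LEMMAS AND PROOFS =====

-- reference function: keep nonzeros and every other zero (b = "keep the next zero")
def pvG (b : Bool) : List Int → List Int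
  | [] => []
  | x :: xs => if x = 0 then (if b then x :: pvG (!b) xs else pvG (!b) xs) else x :: pvG b xs

-- positions (from s) of the zeros of xs
def pvZ (s : Int) : List Int → List Int
  | [] => []
  | x :: xs => if x = 0 then s :: pvZ (s + 1) xs else pvZ (s + 1) xs

-- pvSel true l = elements of l at odd positions (the dropped ones)
def pvSel : Bool → List Int → List Int
  | _, [] => []
  | true, _ :: l => pvSel false l
  | false, a :: l => a :: pvSel true l

-- B's membership test, named so that simp leaves it alone until unfolded
def pvKeep (T : List Int) (p : Int × Int) : Bool := !(decide (p.1 ∈ T))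

theorem pvMod2 (a : Int) : PySem.Int.mod a 2 = a % 2 :=
  PySem.Int.mod_eq_emod_of_pos (by omega)

theorem pvZ_lb (xs : List Int) (s i : Int) (h : i ∈ pvZ s xs) : s ≤ i := by
  induction xs generalizing s with
  | nil => simp [pvZ] at h
  | cons x xs ih =>
    simp only [pvZ] at h
    split at h
    · rcases List.mem_cons.mp h with h | h
      · omega
      · have := ih (s + 1) h; omega
    · have := ih (s + 1) h; omega

theorem pvSel_sub (b : Bool) (l : List Int) (i : Int) (h : i ∈ pvSel b l) : i ∈ l := by
  induction l generalizing b with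
  | nil => simp [pvSel] at h
  | cons a l ih =>
    cases b with
    | true => exact List.mem_cons_of_mem a (ih false h)
    | false =>
      rcases List.mem_cons.mp h with h | h
      · simp [h]
      · exact List.mem_cons_of_mem a (ih true h)

theorem pvZ_eq (xs : List Int) (s : Int) :
    ((PySem.List.enumerate xs s).filter (fun p => p.2 == 0)).map (fun p => p.1) = pvZ s xs := by
  induction xs generalizing s with
  | nil => simp [PySem.List.enumerate_nil, pvZ]
  | cons x xs ih =>
    simp only [PySem.List.enumerate_cons, List.filter_cons, pvZ]
    by_cases hx : x = 0 <;> simp [hx, ih]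

theorem pvSel_eq (l : List Int) (k : Int) :
    ((PySem.List.enumerate l k).filter (fun q => q.1 % 2 == 1)).map (fun q => q.2)
      = pvSel (k % 2 == 0) l := by
  induction l generalizing k with
  | nil => simp [PySem.List.enumerate_nil, pvSel]
  | cons a l ih =>
    simp only [PySem.List.enumerate_cons, List.filter_cons]
    by_cases h : k % 2 = 0
    · have h1 : (k + 1) % 2 = 1 := by omega
      simp [h, ih (k + 1), h1, pvSel]
    · have h0 : k % 2 = 1 := by omega
      have h1 : (k + 1) % 2 = 0 := by omega
      simp [h0, ih (k + 1), h1, pvSel]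

-- A's loop invariant
theorem pvA_loop (xs : List Int) (c : Int) (acc : List Int) (hc : 0 ≤ c) :
    (xs.foldl pairZerosStep (c, acc)).2 = acc ++ pvG (c % 2 == 0) xs := by
  induction xs generalizing c acc with
  | nil => simp [pvG]
  | cons x xs ih =>
    rw [List.foldl_cons]
    by_cases hx : x = 0
    · subst hx
      by_cases h : c % 2 = 0
      · have h1 : (c + 1) % 2 = 1 := by omega
        have hstep : pairZerosStep (c, acc) 0 = (c + 1, acc ++ [0]) := by
          simp [pairZerosStep, h1]
        rw [hstep, ih (c + 1) (acc ++ [0]) (by omega), h1]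
        simp [pvG, h]
      · have h1 : (c + 1) % 2 = 0 := by omega
        have h0 : c % 2 = 1 := by omega
        have hstep : pairZerosStep (c, acc) 0 = (c + 1, acc) := by
          simp [pairZerosStep, h1]
        rw [hstep, ih (c + 1) acc (by omega), h1]
        simp [pvG, h0]
    · have hstep : pairZerosStep (c, acc) x = (c, acc ++ [x]) := by
        simp [pairZerosStep, hx]
      rw [hstep, ih c (acc ++ [x]) hc]
      simp [pvG, hx]

-- B's second pass against the reference function
theorem pvB_main (xs : List Int) (s : Int) (b : Bool) (extra : List Int)
    (hex : ∀ e ∈ extra, e < s) :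
    ((PySem.List.enumerate xs s).filter (pvKeep (extra ++ pvSel b (pvZ s xs)))).map
        (fun p => p.2) = pvG b xs := by
  induction xs generalizing s b extra with
  | nil => simp [PySem.List.enumerate_nil, pvG]
  | cons x xs ih =>
    have hex' : ∀ e ∈ extra, e < s + 1 := fun e he => by have := hex e he; omega
    have hlb : ∀ bb, ∀ i ∈ pvSel bb (pvZ (s + 1) xs), s + 1 ≤ i :=
      fun bb i hi => pvZ_lb xs (s + 1) i (pvSel_sub bb _ i hi)
    rw [PySem.List.enumerate_cons, List.filter_cons]
    by_cases hx : x = 0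
    · subst hx
      rw [show pvZ s (0 :: xs) = s :: pvZ (s + 1) xs from by simp [pvZ]]
      cases b with
      | true =>
        rw [show pvSel true (s :: pvZ (s + 1) xs) = pvSel false (pvZ (s + 1) xs) from rfl]
        have hk : pvKeep (extra ++ pvSel false (pvZ (s + 1) xs)) (s, 0) = true := by
          simp only [pvKeep, Bool.not_eq_eq_eq_not, Bool.not_true, decide_eq_false_iff_not,
            List.mem_append]
          rintro (h | h)
          · exact absurd (hex s h) (by omega)
          · exact absurd (hlb false s h) (by omega)
        rw [hk, if_pos rfl, List.map_cons, ih (s + 1) false extra hex']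
        simp [pvG]
      | false =>
        rw [show extra ++ pvSel false (s :: pvZ (s + 1) xs)
              = (extra ++ [s]) ++ pvSel true (pvZ (s + 1) xs) from by simp [pvSel]]
        have hk : pvKeep ((extra ++ [s]) ++ pvSel true (pvZ (s + 1) xs)) (s, 0) = false := by
          simp [pvKeep]
        rw [hk, if_neg (by simp)]
        rw [ih (s + 1) true (extra ++ [s]) (by
          intro e he
          rcases List.mem_append.mp he with h | h
          · have := hex e h; omega
          · simp only [List.mem_singleton] at h; omega)]
        simp [pvG]
    · rw [show pvZ s (x :: xs) = pvZ (s + 1) xs from by simp [pvZ, hx]]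
      have hk : pvKeep (extra ++ pvSel b (pvZ (s + 1) xs)) (s, x) = true := by
        simp only [pvKeep, Bool.not_eq_eq_eq_not, Bool.not_true, decide_eq_false_iff_not,
          List.mem_append]
        rintro (h | h)
        · exact absurd (hex s h) (by omega)
        · exact absurd (hlb b s h) (by omega)
      rw [hk, if_pos rfl, List.map_cons, ih (s + 1) b extra hex']
      simp [pvG, hx]

-- ===== VERDICT (by name: the statement is the Claim_ definition above) =====
theorem pair_zeros_spec : Claim_equal_pair_zeros := by
  intro arr _
  unfold Spec_pair_zeros pair_zeros pair_zeros_alt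
  rw [pvA_loop arr 0 [] le_rfl]
  simp only [List.nil_append]
  rw [pvZ_eq arr 0]
  rw [show (fun (q : Int × Int) => PySem.Int.mod q.1 2 == 1) = (fun q => q.1 % 2 == 1) from by
    funext q; rw [pvMod2]]
  rw [pvSel_eq (pvZ 0 arr) 0]
  have hfc : ((PySem.List.enumerate arr).filter
      (fun p => !(PySem.Set.contains
        (PySem.Set.ofList (pvSel ((0:Int) % 2 == 0) (pvZ 0 arr))) p.1)))
      = ((PySem.List.enumerate arr).filter
        (pvKeep (([] : List Int) ++ pvSel true (pvZ 0 arr)))) := by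
    apply List.filter_congr
    intro p _
    simp [pvKeep, PySem.Set.contains, PySem.Set.mem_ofList]
  rw [hfc, pvB_main arr 0 true [] (by simp)]
  rfl
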